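-- pv_equiv track=rewrite | github.com/RuZhan2024/Final_Project | labels/make_urfd_labels.py | _runs_from_flags
-- ===== SOURCE A (Python) =====
-- from typing import Dict, List, Optional, Tuple
--
-- def _runs_from_flags(flags: List[bool], min_run: int) -> List[List[int]]:
--     """
--     Convert a boolean list to contiguous True runs:
--       flags: [False, True, True, False] -> [[1, 3]]
--
--     Runs are returned as [start, end_excl].
--     """
--     runs: List[List[int]] = []
--     start: Optional[int] = None
--     for t, b in enumerate(flags):
--         if b and start is None:
--             start = t
--         elif (not b) and start is not None:
--             end = t
--             if end - start >= min_run: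
--                 runs.append([start, end])
--             start = None
--     if start is not None:
--         end = len(flags)
--         if end - start >= min_run:
--             runs.append([start, end])
--     return runs
-- ===== SOURCE B (Python) =====
-- def _runs_from_flags(flags, min_run):
--     """
--     Boundary-index formulation: detect rising/falling edges on a False-padded
--     copy of flags, pair them up, and keep the pairs spanning >= min_run.
--     """
--     padded = [False] + list(flags) + [False]
--     edges = list(zip(padded, padded[1:]))
--     starts = [i for i, (p, b) in enumerate(edges) if b and not p]
--     ends = [i for i, (p, b) in enumerate(edges) if p and not b]
--     return [[s, e] for s, e in zip(starts, ends) if e - s >= min_run]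
-- ===== Notes on version B (the rewrite author's own statement) =====
-- stated objective: alternative
-- what changed: Replaces A's fused state machine (running optional start threaded through one loop plus a post-loop flush) by an edge-detection pass: pad flags with False, collect rising-edge start indices and falling-edge exclusive-end indices, zip them and keep pairs of length >= min_run.
import Mathlib
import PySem

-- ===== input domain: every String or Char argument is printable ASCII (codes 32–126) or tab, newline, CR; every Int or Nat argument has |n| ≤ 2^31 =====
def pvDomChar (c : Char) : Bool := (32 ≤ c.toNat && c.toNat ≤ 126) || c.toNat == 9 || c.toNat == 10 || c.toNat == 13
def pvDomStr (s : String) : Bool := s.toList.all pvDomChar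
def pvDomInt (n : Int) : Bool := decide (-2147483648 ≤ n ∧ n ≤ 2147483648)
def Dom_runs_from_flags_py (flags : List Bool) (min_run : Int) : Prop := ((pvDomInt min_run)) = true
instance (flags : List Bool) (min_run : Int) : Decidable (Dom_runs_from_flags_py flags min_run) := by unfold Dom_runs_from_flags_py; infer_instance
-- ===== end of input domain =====

-- B replaces A's single-pass start-state machine by an edge-detection pass
-- (pad with False, collect rising/falling edge indices, zip and filter); same cost.

-- ===== PORT A =====
-- the for-loop over enumerate(flags): state (runs, start), index t; n = len(flags) for the final flush
def pvLoopA (n min_run : Int) (t : Int) (runs : List (List Int)) (start : Option Int) :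
    List Bool → List (List Int)
  | [] =>
    match start with
    | none => runs
    | some s => if n - s ≥ min_run then runs ++ [[s, n]] else runs
  | b :: rest =>
    match start, b with
    | none, true => pvLoopA n min_run (t + 1) runs (some t) rest
    | some s, false =>
        pvLoopA n min_run (t + 1)
          (if t - s ≥ min_run then runs ++ [[s, t]] else runs) none rest
    | st, _ => pvLoopA n min_run (t + 1) runs st rest

def runs_from_flags_py (flags : List Bool) (min_run : Int) : List (List Int) :=
  pvLoopA (flags.length : Int) min_run 0 [] none flags

-- ===== PORT B =====
def runs_from_flags_py_alt (flags : List Bool) (min_run : Int) : List (List Int) :=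
  let padded := false :: (flags ++ [false])
  let edges := padded.zip (padded.drop 1)
  let starts := ((PySem.List.enumerate edges).filter (fun x => x.2.2 && !x.2.1)).map (·.1)
  let ends := ((PySem.List.enumerate edges).filter (fun x => x.2.1 && !x.2.2)).map (·.1)
  ((starts.zip ends).filter (fun p => p.2 - p.1 ≥ min_run)).map (fun p => [p.1, p.2])

-- ===== PRECONDITION & SPEC =====
def Spec_runs_from_flags_py (flags : List Bool) (min_run : Int) (out : List (List Int)) : Prop := out = runs_from_flags_py_alt flags min_run
instance (flags : List Bool) (min_run : Int) (out : List (List Int)) : Decidable (Spec_runs_from_flags_py flags min_run out) := by unfold Spec_runs_from_flags_py; infer_instance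

-- ===== CLAIM (what is proved, stated in full; the proofs are below) =====
def Claim_equal_runs_from_flags_py : Prop := ∀ (flags : List Bool) (min_run : Int), Dom_runs_from_flags_py flags min_run → Spec_runs_from_flags_py flags min_run (runs_from_flags_py flags min_run)

-- ===== LEMMAS AND PROOFS =====

-- canonical list of maximal runs of `l`, scanning from index `i` with optional open run `cur`
def pvRuns (i : Int) (cur : Option Int) : List Bool → List (Int × Int)
  | [] => match cur with | none => [] | some s => [(s, i)]
  | b :: rest =>
    match cur, b with
    | none, true => pvRuns (i + 1) (some i) rest
    | some s, false => (s, i) :: pvRuns (i + 1) none rest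
    | cur, _ => pvRuns (i + 1) cur rest

def pvFilt (min_run : Int) (r : List (Int × Int)) : List (List Int) :=
  (r.filter (fun p => p.2 - p.1 ≥ min_run)).map (fun p => [p.1, p.2])

-- an open run is the head of pvRuns
theorem pvRuns_some (l : List Bool) : ∀ (i s : Int),
    ∃ e tl, pvRuns i (some s) l = (s, e) :: tl := by
  induction l with
  | nil => intro i s; exact ⟨i, [], rfl⟩
  | cons b rest ih =>
    intro i s
    cases b with
    | false => exact ⟨i, pvRuns (i + 1) none rest, rfl⟩
    | true => simpa [pvRuns] using ih (i + 1) s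

-- A's loop appends exactly the filtered canonical runs
theorem pvLoopA_eq (min_run : Int) (l : List Bool) : ∀ (n t : Int) (runs : List (List Int))
    (start : Option Int), n = t + l.length →
    pvLoopA n min_run t runs start l = runs ++ pvFilt min_run (pvRuns t start l) := by
  induction l with
  | nil =>
    intro n t runs start h
    simp at h; subst h
    cases start with
    | none => simp [pvLoopA, pvRuns, pvFilt]
    | some s => by_cases hc : min_run ≤ n - s <;> simp [pvLoopA, pvRuns, pvFilt, hc]
  | cons b rest ih =>
    intro n t runs start h
    have h' : n = (t + 1) + (rest.length : Int) := by simp at h ⊢; omega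
    cases start with
    | none =>
      cases b with
      | false => simpa [pvLoopA, pvRuns] using ih n (t + 1) runs none h'
      | true => simpa [pvLoopA, pvRuns] using ih n (t + 1) runs (some t) h'
    | some s =>
      cases b with
      | true => simpa [pvLoopA, pvRuns] using ih n (t + 1) runs (some s) h'
      | false =>
        by_cases hc : min_run ≤ t - s <;>
          simp [pvLoopA, pvRuns, pvFilt, hc, ih n (t + 1) _ none h', List.append_assoc]

-- edge lists (B's two comprehensions), in recursive form: previous value `p`, index `i`
def pvRise (p : Bool) (i : Int) : List Bool → List Int
  | [] => []
  | b :: rest => (if b && !p then [i] else []) ++ pvRise b (i + 1) rest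

def pvFall (p : Bool) (i : Int) : List Bool → List Int
  | [] => []
  | b :: rest => (if p && !b then [i] else []) ++ pvFall b (i + 1) rest

-- B's enumerate-filter-map over zip(padded, padded[1:]) computes the recursive edge scans
theorem pvRise_spec (l : List Bool) : ∀ (p : Bool) (i : Int),
    ((PySem.List.enumerate ((p :: l).zip l) i).filter (fun x => x.2.2 && !x.2.1)).map (·.1)
      = pvRise p i l := by
  induction l with
  | nil => intro p i; simp [pvRise]
  | cons b rest ih =>
    intro p i
    by_cases hb : (b && !p) = true <;>
      simp [PySem.List.enumerate_cons, pvRise, hb, ih b (i + 1)]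

theorem pvFall_spec (l : List Bool) : ∀ (p : Bool) (i : Int),
    ((PySem.List.enumerate ((p :: l).zip l) i).filter (fun x => x.2.1 && !x.2.2)).map (·.1)
      = pvFall p i l := by
  induction l with
  | nil => intro p i; simp [pvFall]
  | cons b rest ih =>
    intro p i
    by_cases hb : (p && !b) = true <;>
      simp [PySem.List.enumerate_cons, pvFall, hb, ih b (i + 1)]

-- the edge scans of the padded list are the starts / ends of the canonical runs
theorem pvEdges_eq (l : List Bool) : ∀ (i : Int),
    (pvRise false i (l ++ [false]) = (pvRuns i none l).map Prod.fst ∧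
     pvFall false i (l ++ [false]) = (pvRuns i none l).map Prod.snd) ∧
    (∀ s : Int,
     pvRise true i (l ++ [false]) = ((pvRuns i (some s) l).map Prod.fst).tail ∧
     pvFall true i (l ++ [false]) = (pvRuns i (some s) l).map Prod.snd) := by
  induction l with
  | nil =>
    intro i
    refine ⟨⟨by simp [pvRise, pvRuns], by simp [pvFall, pvRuns]⟩, fun s => ⟨?_, ?_⟩⟩ <;>
      simp [pvRise, pvFall, pvRuns]
  | cons b rest ih =>
    intro i
    refine ⟨⟨?_, ?_⟩, fun s => ⟨?_, ?_⟩⟩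
    · cases b with
      | false => simpa [pvRise, pvRuns] using ((ih (i + 1)).1).1
      | true =>
        obtain ⟨e, tl, he⟩ := pvRuns_some rest (i + 1) i
        simp [pvRise, pvRuns, he, (((ih (i + 1)).2) i).1]
    · cases b with
      | false => simpa [pvFall, pvRuns] using ((ih (i + 1)).1).2
      | true => simpa [pvFall, pvRuns] using (((ih (i + 1)).2) i).2
    · cases b with
      | true => simpa [pvRise, pvRuns] using (((ih (i + 1)).2) s).1
      | false => simpa [pvRise, pvRuns] using ((ih (i + 1)).1).1
    · cases b with
      | true => simpa [pvFall, pvRuns] using (((ih (i + 1)).2) s).2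
      | false => simpa [pvFall, pvRuns] using ((ih (i + 1)).1).2

theorem pvAlt_eq (flags : List Bool) (min_run : Int) :
    runs_from_flags_py_alt flags min_run = pvFilt min_run (pvRuns 0 none flags) := by
  simp only [runs_from_flags_py_alt, List.drop_succ_cons, List.drop_zero]
  rw [pvRise_spec, pvFall_spec, ((pvEdges_eq flags 0).1).1, ((pvEdges_eq flags 0).1).2,
    List.zip_map']
  simp [pvFilt]

-- ===== VERDICT (by name: the statement is the Claim_ definition above) =====
theorem runs_from_flags_py_spec : Claim_equal_runs_from_flags_py := by
  intro flags min_run _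
  unfold Spec_runs_from_flags_py runs_from_flags_py
  rw [pvAlt_eq, pvLoopA_eq min_run flags _ 0 [] none (by simp), List.nil_append]
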